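-- pv_equiv track=rewrite | github.com/Freedom18946/singbox-rust | scripts/tools/dual_kernel_verification/planner_filters.py | passes_latest_run_health
-- ===== SOURCE A (Python) =====
-- from collections.abc import Iterable, Mapping
-- from typing import Any
--
-- def _string_set(values: Iterable[str]) -> set[str]:
--     return {value for value in values if isinstance(value, str)}
--
-- def _latest_run_health_counts(outbound_rollup: Mapping[str, Any]) -> dict[str, int]:
--     value = outbound_rollup.get("latest_run_health_counts")
--     if not isinstance(value, Mapping):
--         return {}
--     return {
--         key: count
--         for key, count in value.items()
--         if isinstance(key, str) and isinstance(count, int)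
--     }
--
-- def passes_latest_run_health(
--     outbound_rollup: Mapping[str, Any],
--     allowed: Iterable[str],
-- ) -> bool:
--     allowed_set = _string_set(allowed)
--     if not allowed_set:
--         return True
--     counts = _latest_run_health_counts(outbound_rollup)
--     return any(counts.get(value, 0) > 0 for value in allowed_set)
-- ===== SOURCE B (Python) =====
-- from collections.abc import Mapping
--
--
-- def passes_latest_run_health(outbound_rollup, allowed):
--     raw = outbound_rollup.get("latest_run_health_counts")
--     if not isinstance(raw, Mapping):
--         raw = {}
--     items = list(allowed)
--     i = 0
--     seen_string = False
--     while i < len(items):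
--         v = items[i]
--         if isinstance(v, str):
--             c = raw.get(v)
--             if isinstance(c, int) and c > 0:
--                 return True
--             seen_string = True
--         i += 1
--     return not seen_string
-- ===== Notes on version B (the rewrite author's own statement) =====
-- stated objective: simpler
-- what changed: B builds no sets and no filtered counts dict at all: a short-circuiting early-exit scan over the allowed iterable probes the raw mapping directly with .get and tracks via a while-loop scan with a seen-string flag whether any string value occurred (returning True if none did), replacing A's two comprehensions plus any().
import Mathlib
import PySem

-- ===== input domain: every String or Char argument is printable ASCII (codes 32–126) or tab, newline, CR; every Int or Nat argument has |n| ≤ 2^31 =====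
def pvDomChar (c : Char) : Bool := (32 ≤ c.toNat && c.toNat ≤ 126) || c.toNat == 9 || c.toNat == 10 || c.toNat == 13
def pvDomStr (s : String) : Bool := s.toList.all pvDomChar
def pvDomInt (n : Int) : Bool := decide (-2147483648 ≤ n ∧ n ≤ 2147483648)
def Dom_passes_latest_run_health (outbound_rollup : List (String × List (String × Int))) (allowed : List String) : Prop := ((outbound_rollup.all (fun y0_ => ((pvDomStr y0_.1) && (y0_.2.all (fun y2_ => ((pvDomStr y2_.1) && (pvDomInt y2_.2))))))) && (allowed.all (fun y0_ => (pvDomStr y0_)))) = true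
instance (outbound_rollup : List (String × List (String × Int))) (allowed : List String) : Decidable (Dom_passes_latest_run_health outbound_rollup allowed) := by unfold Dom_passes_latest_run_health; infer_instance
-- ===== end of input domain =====

-- B drops A's intermediate structures entirely: one short-circuiting recursive scan over the allowed
-- values probes the raw mapping directly, with a seen-string flag replacing the empty-set guard (objective: simpler).

-- ===== PORT A =====
-- _string_set(values); the isinstance(value, str) filter is vacuous under the typing (allowed : List String)
def pvStringSet (values : List String) : PySem.Set String := PySem.Set.ofList values

-- _latest_run_health_counts: .get on the dict; None is not a Mapping → {}; otherwise the dict comprehension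
-- over value.items() (the isinstance str/int filters are vacuous under the typing dict[str, int])
def pvLatestCounts (outbound_rollup : List (String × List (String × Int))) : PySem.Dict String Int :=
  match (PySem.Dict.ofList outbound_rollup).get? "latest_run_health_counts" with
  | none => PySem.Dict.empty
  | some value =>
      ((PySem.Dict.ofList value).items).foldl (fun d p => d.insert p.1 p.2) PySem.Dict.empty

def passes_latest_run_health (outbound_rollup : List (String × List (String × Int))) (allowed : List String) : Bool :=
  let allowed_set := pvStringSet allowed
  if allowed_set.isEmpty then true
  else
    let counts := pvLatestCounts outbound_rollup
    allowed_set.any (fun value => counts.getD value 0 > 0)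

-- ===== PORT B =====
-- the while loop over items = list(allowed), as tail recursion on the remaining suffix with the seen_string flag;
-- the isinstance(v, str) test is vacuous under the typing, so the True branch always runs;
-- raw.get(v) → Dict.get?; isinstance(c, int) is vacuous (values are Int)
def pvGo (raw : PySem.Dict String Int) : List String → Bool → Bool
  | [], seen_string => !seen_string
  | v :: rest, _seen_string =>
      match raw.get? v with
      | some c => if c > 0 then true else pvGo raw rest true
      | none => pvGo raw rest true

def passes_latest_run_health_alt (outbound_rollup : List (String × List (String × Int))) (allowed : List String) : Bool :=
  let raw : PySem.Dict String Int :=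
    match (PySem.Dict.ofList outbound_rollup).get? "latest_run_health_counts" with
    | none => PySem.Dict.empty           -- not a Mapping → raw = {}
    | some value => PySem.Dict.ofList value
  pvGo raw allowed false

-- ===== PRECONDITION & SPEC =====
def Spec_passes_latest_run_health (outbound_rollup : List (String × List (String × Int))) (allowed : List String) (out : Bool) : Prop := out = passes_latest_run_health_alt outbound_rollup allowed
instance (outbound_rollup : List (String × List (String × Int))) (allowed : List String) (out : Bool) : Decidable (Spec_passes_latest_run_health outbound_rollup allowed out) := by unfold Spec_passes_latest_run_health; infer_instance

-- ===== CLAIM =====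
def Claim_equal_passes_latest_run_health : Prop := ∀ (outbound_rollup : List (String × List (String × Int))) (allowed : List String), Dom_passes_latest_run_health outbound_rollup allowed → Spec_passes_latest_run_health outbound_rollup allowed (passes_latest_run_health outbound_rollup allowed)

-- ===== LEMMAS AND PROOFS =====

-- Rebuilding a dict by inserting its own (nodup-key) items into an empty dict gives back the dict.
theorem pvLatestCounts_eq (value : List (String × Int)) :
    ((PySem.Dict.ofList value).items).foldl (fun d p => d.insert p.1 p.2) PySem.Dict.empty
      = PySem.Dict.ofList value := by
  apply PySem.Dict.ext
  rw [PySem.Dict.items_foldl_insert_fresh]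
  · have h0 : PySem.Dict.empty.items = ([] : List (String × Int)) := rfl
    simp [h0]
  · intro a _; simp [PySem.Dict.contains_empty]
  · exact PySem.Dict.nodup_keys_ofList value

-- On a nonempty list the seen flag is irrelevant and pvGo is the short-circuit any of getD > 0.
theorem pvGo_ne_nil (d : PySem.Dict String Int) :
    ∀ (xs : List String) (seen : Bool), xs ≠ [] →
      pvGo d xs seen = xs.any (fun v => decide (d.getD v 0 > 0)) := by
  intro xs
  induction xs with
  | nil => intro _ h; exact absurd rfl h
  | cons v rest ih =>
    intro seen _
    have hgd : d.getD v 0 = (d.get? v).getD 0 := PySem.Dict.getD_eq_get?_getD d v 0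
    rcases hg : d.get? v with _ | c
    · have hv : d.getD v 0 = 0 := by rw [hgd, hg]; rfl
      rcases Decidable.em (rest = []) with hr | hr
      · subst hr; simp [pvGo, hg, hv]
      · simp [pvGo, hg, hv, ih true hr]
    · have hv : d.getD v 0 = c := by rw [hgd, hg]; rfl
      by_cases hc : c > 0
      · simp [pvGo, hg, hc, hv]
      · rcases Decidable.em (rest = []) with hr | hr
        · subst hr; simp [pvGo, hg, hc, hv]
        · simp [pvGo, hg, hc, hv, ih true hr]

theorem passes_eq (outbound_rollup : List (String × List (String × Int))) (allowed : List String) :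
    passes_latest_run_health outbound_rollup allowed
      = passes_latest_run_health_alt outbound_rollup allowed := by
  unfold passes_latest_run_health passes_latest_run_health_alt pvStringSet pvLatestCounts
  rcases Decidable.em (allowed = []) with hnil | hnil
  · subst hnil; simp [pvGo, PySem.Set.ofList]
  · -- the two programs use the same dict
    have hdict : (match (PySem.Dict.ofList outbound_rollup).get? "latest_run_health_counts" with
        | none => PySem.Dict.empty
        | some value =>
            ((PySem.Dict.ofList value).items).foldl (fun d p => d.insert p.1 p.2) PySem.Dict.empty)
        = (match (PySem.Dict.ofList outbound_rollup).get? "latest_run_health_counts" with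
        | none => (PySem.Dict.empty : PySem.Dict String Int)
        | some value => PySem.Dict.ofList value) := by
      rcases (PySem.Dict.ofList outbound_rollup).get? "latest_run_health_counts" with _ | value
      · rfl
      · exact pvLatestCounts_eq value
    set d := (match (PySem.Dict.ofList outbound_rollup).get? "latest_run_health_counts" with
        | none => (PySem.Dict.empty : PySem.Dict String Int)
        | some value => PySem.Dict.ofList value) with hd
    rw [hdict]
    have hne : (PySem.Set.ofList allowed).isEmpty = false := by
      rcases List.exists_mem_of_ne_nil allowed hnil with ⟨x, hx⟩
      have : x ∈ PySem.Set.ofList allowed := (PySem.Set.mem_ofList allowed x).mpr hx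
      rcases h : (PySem.Set.ofList allowed) with _ | ⟨y, ys⟩
      · rw [h] at this; exact absurd this (List.not_mem_nil)
      · rfl
    rw [pvGo_ne_nil d allowed false hnil]
    simp only [hne, Bool.false_eq_true, if_false]
    rw [Bool.eq_iff_iff]
    simp only [List.any_eq_true, PySem.Set.mem_ofList, decide_eq_true_eq]

-- ===== VERDICT =====
theorem passes_latest_run_health_spec : Claim_equal_passes_latest_run_health := by
  intro outbound_rollup allowed _
  unfold Spec_passes_latest_run_health
  exact passes_eq outbound_rollup allowed
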